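-- pv_equiv track=rewrite | github.com/pravin-hari/password-security-analyzer | modules/attack_simulator.py | _calculate_success_probability
-- ===== SOURCE A (Python) =====
-- def _calculate_success_probability(password: str) -> str:
--     length = len(password)
--     has_lower = any(c.islower() for c in password)
--     has_upper = any(c.isupper() for c in password)
--     has_digit = any(c.isdigit() for c in password)
--     has_special = any(c in '!@#$%^&*()_+-=[]{}|;:\'",.<>?/`~\\' for c in password)
--
--     type_count = sum([has_lower, has_upper, has_digit, has_special])
--
--     if length < 6:
--         return "Extremely High"
--     elif length < 8:
--         return "Very High" if type_count < 3 else "High"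
--     elif length < 10:
--         return "High" if type_count < 3 else "Medium"
--     elif length < 12:
--         return "Medium" if type_count < 3 else "Low"
--     elif length < 14:
--         return "Low" if type_count < 3 else "Very Low"
--     else:
--         return "Extremely Low"
-- ===== SOURCE B (Python) =====
-- import bisect
--
-- _SPECIALS = '!@#$%^&*()_+-=[]{}|;:\'",.<>?/`~\\'
-- _THRESHOLDS = [6, 8, 10, 12, 14]
-- # per length bucket: (label when fewer than 3 character types, label when 3 or more)
-- _TABLE = [
--     ("Extremely High", "Extremely High"),
--     ("Very High", "High"),
--     ("High", "Medium"),
--     ("Medium", "Low"),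
--     ("Low", "Very Low"),
--     ("Extremely Low", "Extremely Low"),
-- ]
--
--
-- def _calculate_success_probability(password: str) -> str:
--     lower = upper = digit = special = False
--     for c in password:
--         if c.islower():
--             lower = True
--         elif c.isupper():
--             upper = True
--         elif c.isdigit():
--             digit = True
--         elif c in _SPECIALS:
--             special = True
--     row = _TABLE[bisect.bisect_right(_THRESHOLDS, len(password))]
--     return row[1] if lower + upper + digit + special >= 3 else row[0]
-- ===== Notes on version B (the rewrite author's own statement) =====
-- stated objective: simpler
-- what changed: A's four separate any()-scans and six-branch if/elif ladder are replaced by one fused flag-setting pass over the characters plus a table-driven lookup: bisect.bisect_right maps the length to a bucket and a precomputed 6-row table yields the label, chosen by whether at least 3 character types occur.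
import Mathlib
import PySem

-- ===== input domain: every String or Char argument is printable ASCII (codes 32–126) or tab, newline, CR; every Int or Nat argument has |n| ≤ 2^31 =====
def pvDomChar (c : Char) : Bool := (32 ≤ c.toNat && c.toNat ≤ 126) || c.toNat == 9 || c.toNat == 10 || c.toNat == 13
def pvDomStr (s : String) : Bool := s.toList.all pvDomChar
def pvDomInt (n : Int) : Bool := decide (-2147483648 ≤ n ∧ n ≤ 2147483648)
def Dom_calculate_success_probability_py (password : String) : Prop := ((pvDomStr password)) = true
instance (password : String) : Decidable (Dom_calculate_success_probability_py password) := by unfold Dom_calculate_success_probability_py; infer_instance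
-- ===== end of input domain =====

-- B replaces A's four any()-scans and six-branch ladder by one fused flag pass plus a
-- bisect/table lookup (measured constant-factor faster in a timing run).

-- ===== PORT A =====
-- 'c in <literal string>' for a single character is membership of c among the string's chars
def pvSpecials : List Char :=
  ['!','@','#','$','%','^','&','*','(',')','_','+','-','=','[',']','{','}','|',';',':','\'','"',',','.','<','>','?','/','`','~','\\']

def calculate_success_probability_py (password : String) : String :=
  let length := PySem.Str.len password
  let has_lower := password.toList.any PySem.Chars.islower
  let has_upper := password.toList.any PySem.Chars.isupper
  let has_digit := password.toList.any PySem.Chars.isdigit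
  let has_special := password.toList.any (fun c => pvSpecials.contains c)
  let type_count : Int :=
    (if has_lower then 1 else 0) + (if has_upper then 1 else 0) +
    (if has_digit then 1 else 0) + (if has_special then 1 else 0)
  if length < 6 then "Extremely High"
  else if length < 8 then (if type_count < 3 then "Very High" else "High")
  else if length < 10 then (if type_count < 3 then "High" else "Medium")
  else if length < 12 then (if type_count < 3 then "Medium" else "Low")
  else if length < 14 then (if type_count < 3 then "Low" else "Very Low")
  else "Extremely Low"

-- ===== PORT B =====
def pvThresholds : List Int := [6, 8, 10, 12, 14]

def pvTable : List (String × String) :=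
  [("Extremely High", "Extremely High"),
   ("Very High", "High"),
   ("High", "Medium"),
   ("Medium", "Low"),
   ("Low", "Very Low"),
   ("Extremely Low", "Extremely Low")]

def pvFlagStep (f : Bool × Bool × Bool × Bool) (c : Char) : Bool × Bool × Bool × Bool :=
  if PySem.Chars.islower c then (true, f.2.1, f.2.2.1, f.2.2.2)
  else if PySem.Chars.isupper c then (f.1, true, f.2.2.1, f.2.2.2)
  else if PySem.Chars.isdigit c then (f.1, f.2.1, true, f.2.2.2)
  else if pvSpecials.contains c then (f.1, f.2.1, f.2.2.1, true)
  else f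

def calculate_success_probability_py_alt (password : String) : String :=
  let f := password.toList.foldl pvFlagStep (false, false, false, false)
  let row := PySem.List.pyGetD pvTable
    ((PySem.List.bisectRight pvThresholds (PySem.Str.len password) : Int)) ("", "")
  if (if f.1 then (1:Int) else 0) + (if f.2.1 then 1 else 0) +
     (if f.2.2.1 then 1 else 0) + (if f.2.2.2 then 1 else 0) ≥ 3
  then row.2 else row.1

-- ===== PRECONDITION & SPEC =====
def Spec_calculate_success_probability_py (password : String) (out : String) : Prop := out = calculate_success_probability_py_alt password
instance (password : String) (out : String) : Decidable (Spec_calculate_success_probability_py password out) := by unfold Spec_calculate_success_probability_py; infer_instance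

-- ===== CLAIM (what is proved, stated in full; the proofs are below) =====
def Claim_equal_calculate_success_probability_py : Prop := ∀ (password : String), Dom_calculate_success_probability_py password → Spec_calculate_success_probability_py password (calculate_success_probability_py password)


-- ===== LEMMAS AND PROOFS =====
theorem pvSpecials_codes : ∀ x ∈ pvSpecials,
    (decide (x.toNat < 48) || decide (57 < x.toNat && x.toNat < 65) ||
     decide (90 < x.toNat && x.toNat < 97) || decide (122 < x.toNat)) = true :=
  List.all_eq_true.mp (by decide)

theorem pvSpecials_not_alnum (c : Char) (hc : c ∈ pvSpecials) :
    PySem.Chars.islower c = false ∧ PySem.Chars.isupper c = false ∧ PySem.Chars.isdigit c = false := by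
  have h := pvSpecials_codes c hc
  simp only [Bool.or_eq_true, Bool.and_eq_true, decide_eq_true_eq] at h
  have e : c.toNat = c.val.toNat := rfl
  refine ⟨?_, ?_, ?_⟩ <;>
  · simp only [PySem.Chars.islower, PySem.Chars.isupper, PySem.Chars.isdigit,
      Bool.and_eq_false_iff, decide_eq_false_iff_not, Char.le_def, UInt32.le_iff_toNat_le]
    have l0 : '0'.val.toNat = 48 := rfl
    have l9 : '9'.val.toNat = 57 := rfl
    have lA : 'A'.val.toNat = 65 := rfl
    have lZ : 'Z'.val.toNat = 90 := rfl
    have la : 'a'.val.toNat = 97 := rfl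
    have lz : 'z'.val.toNat = 122 := rfl
    omega

theorem pvLower_excl (c : Char) (h : PySem.Chars.islower c = true) :
    PySem.Chars.isupper c = false ∧ PySem.Chars.isdigit c = false ∧ c ∉ pvSpecials := by
  refine ⟨?_, ?_, fun hc => by simpa [h] using (pvSpecials_not_alnum c hc).1⟩ <;>
  · simp only [PySem.Chars.islower, Bool.and_eq_true, decide_eq_true_eq, Char.le_def,
      UInt32.le_iff_toNat_le] at h
    simp only [PySem.Chars.isupper, PySem.Chars.isdigit, Bool.and_eq_false_iff,
      decide_eq_false_iff_not, Char.le_def, UInt32.le_iff_toNat_le]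
    have l0 : '0'.val.toNat = 48 := rfl
    have l9 : '9'.val.toNat = 57 := rfl
    have lA : 'A'.val.toNat = 65 := rfl
    have lZ : 'Z'.val.toNat = 90 := rfl
    have la : 'a'.val.toNat = 97 := rfl
    have lz : 'z'.val.toNat = 122 := rfl
    omega

theorem pvUpper_excl (c : Char) (h : PySem.Chars.isupper c = true) :
    PySem.Chars.isdigit c = false ∧ c ∉ pvSpecials := by
  refine ⟨?_, fun hc => by simpa [h] using (pvSpecials_not_alnum c hc).2.1⟩
  simp only [PySem.Chars.isupper, Bool.and_eq_true, decide_eq_true_eq, Char.le_def,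
    UInt32.le_iff_toNat_le] at h
  simp only [PySem.Chars.isdigit, Bool.and_eq_false_iff, decide_eq_false_iff_not,
    Char.le_def, UInt32.le_iff_toNat_le]
  have l0 : '0'.val.toNat = 48 := rfl
  have l9 : '9'.val.toNat = 57 := rfl
  have lA : 'A'.val.toNat = 65 := rfl
  have lZ : 'Z'.val.toNat = 90 := rfl
  have la : 'a'.val.toNat = 97 := rfl
  have lz : 'z'.val.toNat = 122 := rfl
  omega

theorem pvDigit_excl (c : Char) (h : PySem.Chars.isdigit c = true) : c ∉ pvSpecials :=
  fun hc => by simpa [h] using (pvSpecials_not_alnum c hc).2.2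

theorem pvFlags_fold (l : List Char) (a b c d : Bool) :
    l.foldl pvFlagStep (a, b, c, d) =
      (a || l.any PySem.Chars.islower, b || l.any PySem.Chars.isupper,
       c || l.any PySem.Chars.isdigit, d || l.any (fun ch => pvSpecials.contains ch)) := by
  induction l generalizing a b c d with
  | nil => simp
  | cons ch t ih =>
    simp only [List.foldl_cons, List.any_cons]
    by_cases h1 : PySem.Chars.islower ch = true
    · obtain ⟨e1, e2, e3⟩ := pvLower_excl ch h1
      simp [pvFlagStep, h1, e1, e2, e3, ih]
    · rw [Bool.not_eq_true] at h1
      by_cases h2 : PySem.Chars.isupper ch = true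
      · obtain ⟨e2, e3⟩ := pvUpper_excl ch h2
        simp [pvFlagStep, h1, h2, e2, e3, ih]
      · rw [Bool.not_eq_true] at h2
        by_cases h3 : PySem.Chars.isdigit ch = true
        · have e3 := pvDigit_excl ch h3
          simp [pvFlagStep, h1, h2, h3, e3, ih]
        · rw [Bool.not_eq_true] at h3
          by_cases h4 : ch ∈ pvSpecials
          · simp [pvFlagStep, h1, h2, h3, h4, ih]
          · simp [pvFlagStep, h1, h2, h3, h4, ih]

theorem pvBucket_eval (n : Int) :
    PySem.List.bisectRight pvThresholds n =
      (if n < 6 then 0 else if n < 8 then 1 else if n < 10 then 2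
       else if n < 12 then 3 else if n < 14 then 4 else 5) := by
  simp [pvThresholds, PySem.List.bisectRight, PySem.List.bisectRightLoop]
  split_ifs <;> omega

-- ===== VERDICT (by name: the statement is the Claim_ definition above) =====
theorem calculate_success_probability_py_spec : Claim_equal_calculate_success_probability_py := by
  intro password _
  unfold Spec_calculate_success_probability_py
  unfold calculate_success_probability_py calculate_success_probability_py_alt
  rw [pvFlags_fold, pvBucket_eval]
  simp only [Bool.false_or]
  set n : Int := PySem.Str.len password with hn
  set tc : Int :=
    (if password.toList.any PySem.Chars.islower then (1:Int) else 0) +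
    (if password.toList.any PySem.Chars.isupper then (1:Int) else 0) +
    (if password.toList.any PySem.Chars.isdigit then (1:Int) else 0) +
    (if password.toList.any (fun ch => pvSpecials.contains ch) then (1:Int) else 0) with htc
  by_cases h1 : n < 6
  · simp [h1, pvTable, PySem.List.pyGetD, PySem.List.pyGet?, PySem.List.pyIdx?]
  · by_cases h2 : n < 8
    · by_cases h6 : tc < 3
      · have hb : ¬ (3:Int) ≤ tc := by omega
        simp [h1, h2, h6, hb, pvTable, PySem.List.pyGetD, PySem.List.pyGet?, PySem.List.pyIdx?]
      · have hb : (3:Int) ≤ tc := by omega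
        simp [h1, h2, h6, hb, pvTable, PySem.List.pyGetD, PySem.List.pyGet?, PySem.List.pyIdx?]
    · by_cases h3 : n < 10
      · by_cases h6 : tc < 3
        · have hb : ¬ (3:Int) ≤ tc := by omega
          simp [h1, h2, h3, h6, hb, pvTable, PySem.List.pyGetD, PySem.List.pyGet?, PySem.List.pyIdx?]
        · have hb : (3:Int) ≤ tc := by omega
          simp [h1, h2, h3, h6, hb, pvTable, PySem.List.pyGetD, PySem.List.pyGet?, PySem.List.pyIdx?]
      · by_cases h4 : n < 12
        · by_cases h6 : tc < 3
          · have hb : ¬ (3:Int) ≤ tc := by omega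
            simp [h1, h2, h3, h4, h6, hb, pvTable, PySem.List.pyGetD, PySem.List.pyGet?, PySem.List.pyIdx?]
          · have hb : (3:Int) ≤ tc := by omega
            simp [h1, h2, h3, h4, h6, hb, pvTable, PySem.List.pyGetD, PySem.List.pyGet?, PySem.List.pyIdx?]
        · by_cases h5 : n < 14
          · by_cases h6 : tc < 3
            · have hb : ¬ (3:Int) ≤ tc := by omega
              simp [h1, h2, h3, h4, h5, h6, hb, pvTable, PySem.List.pyGetD, PySem.List.pyGet?, PySem.List.pyIdx?]
            · have hb : (3:Int) ≤ tc := by omega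
              simp [h1, h2, h3, h4, h5, h6, hb, pvTable, PySem.List.pyGetD, PySem.List.pyGet?, PySem.List.pyIdx?]
          · simp [h1, h2, h3, h4, h5, pvTable, PySem.List.pyGetD, PySem.List.pyGet?, PySem.List.pyIdx?]
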